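-- pv_equiv track=rewrite | github.com/13OT/Spatial-DS-Alathel | Assignments/Assignment 5.py | rm
-- ===== SOURCE A (Python) =====
-- def rm(d, x):
-- #Removes all pairs with value x.
-- #Given:  d = {1:2, 2:3, 3:2, 4:3}
-- #Usage:  rm(d,2)
-- #Results: {2:3, 4:3}
-- 	toDel=[]
-- 	for k,v in d.items():
-- 		if v == x:
-- 			toDel.append(k)
-- 	for i in toDel:
-- 		del d[i]
-- 	return d
-- ===== SOURCE B (Python) =====
-- def rm(d, x):
--     keep = {k: v for k, v in d.items() if v != x}
--     d.clear()
--     d.update(keep)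
--     return d
-- ===== Notes on version B (the rewrite author's own statement) =====
-- stated objective: simpler
-- what changed: Instead of collecting the keys to delete and then deleting them one by one from d, B builds the surviving entries in a single comprehension and replaces d's contents with them via clear()+update(), preserving in-place mutation and insertion order.
import Mathlib
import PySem

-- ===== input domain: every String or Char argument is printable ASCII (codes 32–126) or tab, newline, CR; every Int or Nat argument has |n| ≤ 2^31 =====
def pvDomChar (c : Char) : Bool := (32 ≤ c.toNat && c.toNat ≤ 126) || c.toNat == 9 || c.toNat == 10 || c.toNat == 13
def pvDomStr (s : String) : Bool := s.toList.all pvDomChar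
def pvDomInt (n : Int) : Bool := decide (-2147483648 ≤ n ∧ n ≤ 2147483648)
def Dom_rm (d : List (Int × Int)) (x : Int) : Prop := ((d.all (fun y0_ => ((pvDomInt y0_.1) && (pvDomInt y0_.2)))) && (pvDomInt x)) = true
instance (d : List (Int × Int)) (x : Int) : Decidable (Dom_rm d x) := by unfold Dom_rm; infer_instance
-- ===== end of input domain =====

-- B replaces A's "collect keys to delete, then delete each" with "build the surviving
-- entries once and replace d's contents" (clear+update); both mutate d in place in Python,
-- and the equivalence proved here is about the returned contents.


-- ===== PORT A =====
-- 'del d[i]': remove the (unique) entry with key i, keeping order of the rest.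
def pyDel (d : List (Int × Int)) (k : Int) : List (Int × Int) :=
  match d with
  | [] => []
  | (a, b) :: t => if a == k then t else (a, b) :: pyDel t k

def rm (d : List (Int × Int)) (x : Int) : List (Int × Int) :=
  let toDel := d.foldl (fun acc kv => if kv.2 == x then acc ++ [kv.1] else acc) []
  toDel.foldl (fun dd i => pyDel dd i) d

-- ===== PORT B =====
-- dict-comprehension insert: overwrite in place if the key exists, else append.
def dInsert (acc : List (Int × Int)) (k v : Int) : List (Int × Int) :=
  if acc.any (fun p => p.1 == k) then acc.map (fun p => if p.1 == k then (k, v) else p)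
  else acc ++ [(k, v)]

def rm_alt (d : List (Int × Int)) (x : Int) : List (Int × Int) :=
  -- keep = {k: v for k, v in d.items() if v != x}
  let keep := d.foldl (fun acc kv => if kv.2 != x then dInsert acc kv.1 kv.2 else acc) []
  -- d.clear(); d.update(keep); return d  — the returned contents are exactly keep
  keep

-- ===== PRECONDITION & SPEC =====
-- Pre_rm states the dict representation invariant: association-list inputs with duplicate
-- keys do not represent any Python dict, so A is never run on them; Pre_ excludes only those.
def Pre_rm (d : List (Int × Int)) (x : Int) : Prop := (d.map Prod.fst).Nodup
instance (d : List (Int × Int)) (x : Int) : Decidable (Pre_rm d x) := by unfold Pre_rm; infer_instance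

def pvWitness_rm : (List (Int × Int)) × Int := ([(1, 2), (2, 3), (3, 2), (4, 3)], 2)

def Spec_rm (d : List (Int × Int)) (x : Int) (out : List (Int × Int)) : Prop := out = rm_alt d x
instance (d : List (Int × Int)) (x : Int) (out : List (Int × Int)) : Decidable (Spec_rm d x out) := by unfold Spec_rm; infer_instance

-- ===== CLAIM (what is proved, stated in full; the proofs are below) =====
def Claim_equal_rm : Prop := ∀ (d : List (Int × Int)) (x : Int), Dom_rm d x → Pre_rm d x → Spec_rm d x (rm d x)

-- ===== LEMMAS AND PROOFS =====

-- A's first loop, characterised: the keys of the entries whose value is x.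
theorem toDel_eq (x : Int) (d : List (Int × Int)) (l : List Int) :
    d.foldl (fun acc kv => if kv.2 == x then acc ++ [kv.1] else acc) l
      = l ++ (d.filter (fun kv => kv.2 == x)).map Prod.fst := by
  induction d generalizing l with
  | nil => simp
  | cons h t ih =>
    simp only [List.foldl_cons, List.filter_cons]
    by_cases hx : h.2 == x
    · rw [if_pos hx, if_pos hx, ih]
      simp
    · rw [if_neg hx, if_neg hx, ih]

-- pyDel on a key not at the head commutes with cons.
theorem foldl_pyDel_cons (a : Int) (b : Int) (t : List (Int × Int)) (ks : List Int)
    (ha : a ∉ ks) :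
    ks.foldl (fun dd i => pyDel dd i) ((a, b) :: t)
      = (a, b) :: ks.foldl (fun dd i => pyDel dd i) t := by
  induction ks generalizing t with
  | nil => rfl
  | cons k kt ih =>
    have hak : a ≠ k := fun h => ha (h ▸ List.mem_cons_self)
    simp only [List.foldl_cons, pyDel]
    rw [if_neg (by simpa using hak)]
    exact ih _ (fun h => ha (List.mem_cons_of_mem _ h))

-- A's second loop, on exactly the keys collected by the first, yields the filter.
theorem foldl_pyDel_toDel (x : Int) (d : List (Int × Int))
    (hnd : (d.map Prod.fst).Nodup) :
    ((d.filter (fun kv => kv.2 == x)).map Prod.fst).foldl (fun dd i => pyDel dd i) d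
      = d.filter (fun kv => kv.2 != x) := by
  induction d with
  | nil => rfl
  | cons h t ih =>
    obtain ⟨a, b⟩ := h
    simp only [List.map_cons, List.nodup_cons] at hnd
    obtain ⟨ha, hnd'⟩ := hnd
    by_cases hx : b = x
    · simp only [List.filter_cons]
      rw [if_pos (by simp [hx])]
      simp only [List.map_cons, List.foldl_cons]
      have hdel : pyDel ((a, b) :: t) a = t := by simp [pyDel]
      rw [hdel, ih hnd']
      simp [hx]
    · simp only [List.filter_cons]
      rw [if_neg (by simp [hx])]
      have hnotin : a ∉ (t.filter (fun kv => kv.2 == x)).map Prod.fst := by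
        intro hmem
        obtain ⟨p, hp, rfl⟩ := List.mem_map.1 hmem
        exact ha (List.mem_map.2 ⟨p, List.mem_of_mem_filter hp, rfl⟩)
      rw [foldl_pyDel_cons a b t _ hnotin, ih hnd']
      simp [hx]

-- On a fresh key, the comprehension insert appends.
theorem dInsert_fresh (acc : List (Int × Int)) (k v : Int)
    (hk : k ∉ acc.map Prod.fst) :
    dInsert acc k v = acc ++ [(k, v)] := by
  unfold dInsert
  rw [if_neg]
  simp only [List.any_eq_true]
  rintro ⟨p, hp, hpk⟩
  exact hk (List.mem_map.2 ⟨p, hp, by simpa using hpk⟩)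

-- B's loop, characterised: with pairwise-distinct keys every insert is an append,
-- so the fold builds acc ++ (survivors of d).
theorem keep_eq (x : Int) (d : List (Int × Int)) (acc : List (Int × Int))
    (hnd : (d.map Prod.fst).Nodup)
    (hdisj : ∀ k, k ∈ acc.map Prod.fst → k ∉ d.map Prod.fst) :
    d.foldl (fun acc kv => if kv.2 != x then dInsert acc kv.1 kv.2 else acc) acc
      = acc ++ d.filter (fun kv => kv.2 != x) := by
  induction d generalizing acc with
  | nil => simp
  | cons h t ih =>
    obtain ⟨a, b⟩ := h
    simp only [List.map_cons, List.nodup_cons] at hnd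
    obtain ⟨ha, hnd'⟩ := hnd
    simp only [List.foldl_cons, List.filter_cons]
    by_cases hx : b = x
    · rw [if_neg (by simp [hx]), if_neg (by simp [hx])]
      exact ih acc hnd' (fun k hk hmem =>
        hdisj k hk (by rw [List.map_cons]; exact List.mem_cons_of_mem _ hmem))
    · rw [if_pos (by simp [hx]), if_pos (by simp [hx])]
      have hafresh : a ∉ acc.map Prod.fst := fun hmem =>
        hdisj a hmem (by rw [List.map_cons]; exact List.mem_cons_self)
      rw [dInsert_fresh acc a b hafresh, ih (acc ++ [(a, b)]) hnd' ?_]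
      · simp
      · intro k hk
        simp only [List.map_append, List.mem_append, List.map_cons] at hk ⊢
        rcases hk with hk | hk
        · exact fun hmem => hdisj k hk (by rw [List.map_cons]; exact List.mem_cons_of_mem _ hmem)
        · simp only [List.map_cons, List.map_nil, List.mem_singleton] at hk
          subst hk
          exact ha

-- ===== VERDICT (by name: the statement is the Claim_ definition above) =====
theorem rm_spec : Claim_equal_rm := by
  intro d x _ hpre
  show rm d x = rm_alt d x
  unfold rm rm_alt
  rw [toDel_eq, List.nil_append, foldl_pyDel_toDel x d hpre,
    keep_eq x d [] hpre (by simp), List.nil_append]
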